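-- pv_equiv track=rewrite | github.com/AlexO28/leet_code_problems | making_file_names_unique.py | getFolderNames
-- ===== SOURCE A (Python) =====
-- from typing import List
-- from collections import defaultdict
--
-- def getFolderNames(names: List[str]) -> List[str]:
--     name_counter = defaultdict(int)
--     for i, name in enumerate(names):
--         if name in name_counter:
--             suffix_num = name_counter[name]
--             while name + "(" + str(suffix_num) + ")" in name_counter:
--                 suffix_num += 1
--             name_counter[name] = suffix_num + 1
--             names[i] = name + "(" + str(suffix_num) + ")"
--         name_counter[names[i]] = 1
--     return names
-- ===== SOURCE B (Python) =====
-- def getFolderNames(names):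
--     def assign(rest, used):
--         if not rest:
--             return []
--         name = rest[0]
--         if name in used:
--             name = next(name + "(" + str(k) + ")"
--                         for k in range(1, len(used) + 2)
--                         if name + "(" + str(k) + ")" not in used)
--         return [name] + assign(rest[1:], used | {name})
--     return assign(names, set())
-- ===== Notes on version B (the rewrite author's own statement) =====
-- stated objective: alternative
-- what changed: B drops A's per-name cached-suffix counter dict and in-place mutation entirely: it is a structural recursion over the list carrying only a set of used names, and it finds the free suffix as the first element of a bounded range filtered against that set (pigeonhole guarantees one exists in 1..len(used)+1) instead of A's unbounded while-loop resumed from a cached counter.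
import Mathlib
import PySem

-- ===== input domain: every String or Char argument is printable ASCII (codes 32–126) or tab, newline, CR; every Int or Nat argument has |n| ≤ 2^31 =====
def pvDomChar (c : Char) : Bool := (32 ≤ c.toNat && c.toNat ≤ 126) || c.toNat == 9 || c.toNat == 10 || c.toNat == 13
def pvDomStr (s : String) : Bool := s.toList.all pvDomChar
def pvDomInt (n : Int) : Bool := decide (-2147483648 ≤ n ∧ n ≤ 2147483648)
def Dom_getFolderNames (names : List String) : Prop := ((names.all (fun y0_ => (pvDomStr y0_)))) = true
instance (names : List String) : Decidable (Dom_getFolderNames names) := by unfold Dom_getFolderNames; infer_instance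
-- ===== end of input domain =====

-- B replaces A's cached-suffix counter dict and while-loop by a structural recursion over the list
-- carrying only a used-set, finding the free suffix as the head of a filtered bounded range (objective: alternative).
-- A mutates its argument list in place; the equivalence proved here is about the RETURN value only (B builds a fresh list).

-- ===== PORT A =====
-- the string  name + "(" + str(k) + ")"
def pvCand (name : String) (k : Int) : String :=
  name ++ "(" ++ PySem.Int.toStr k ++ ")"

-- A's inner while-loop:  while name+"("+str(k)+")" in name_counter: k += 1
-- (the fuel counter.size+1 is only a termination guard; it is provably never exhausted)
def pvFindA (c : PySem.Dict String Int) (name : String) : Int → Nat → Int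
  | k, 0 => k
  | k, Nat.succ f => if c.contains (pvCand name k) then pvFindA c name (k + 1) f else k

-- A's loop body over (names-prefix built so far, name_counter)
def pvStepA (st : List String × PySem.Dict String Int) (name : String) :
    List String × PySem.Dict String Int :=
  if st.2.contains name then
    let s := pvFindA st.2 name (st.2.getD name 0) (st.2.size + 1)
    (st.1 ++ [pvCand name s], (st.2.insert name (s + 1)).insert (pvCand name s) 1)
  else
    (st.1 ++ [name], st.2.insert name 1)

def getFolderNames (names : List String) : List String :=
  (names.foldl pvStepA ([], PySem.Dict.empty)).1

-- ===== PORT B =====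
-- B's generator:  next(name+"("+str(k)+")" for k in range(1, len(used)+2) if … not in used)
-- (the [] branch mirrors Python's StopIteration; pigeonhole makes it unreachable, see pvFree_eq below)
def pvFree (u : PySem.Set String) (name : String) : String :=
  match (PySem.List.pyRange 1 ((u.length : Int) + 2) 1).filter
      (fun k => !(PySem.Set.contains u (pvCand name k))) with
  | [] => name
  | k :: _ => pvCand name k

-- B's recursive helper  assign(rest, used)
def pvAssign (rest : List String) (u : PySem.Set String) : List String :=
  match rest with
  | [] => []
  | name :: rest' =>
      let nm := if PySem.Set.contains u name then pvFree u name else name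
      nm :: pvAssign rest' (PySem.Set.add u nm)

def getFolderNames_alt (names : List String) : List String :=
  pvAssign names PySem.Set.empty

-- ===== PRECONDITION & SPEC =====
def Spec_getFolderNames (names : List String) (out : List String) : Prop := out = getFolderNames_alt names
instance (names : List String) (out : List String) : Decidable (Spec_getFolderNames names out) := by unfold Spec_getFolderNames; infer_instance

-- ===== CLAIM =====
def Claim_equal_getFolderNames : Prop := ∀ (names : List String), Dom_getFolderNames names → Spec_getFolderNames names (getFolderNames names)

-- ===== LEMMAS AND PROOFS =====

-- decimal decoding, to establish injectivity of str(k) for k ≥ 0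
def pvDec (acc : Nat) (l : List Char) : Nat :=
  l.foldl (fun a c => a * 10 + (c.toNat - 48)) acc

theorem pvDigitChar_val {d : Nat} (h : d < 10) : (Nat.digitChar d).toNat - 48 = d := by
  interval_cases d <;> rfl

theorem pvDec_cons (acc : Nat) (c : Char) (cs : List Char) :
    pvDec acc (c :: cs) = pvDec (acc * 10 + (c.toNat - 48)) cs := by
  unfold pvDec
  rw [List.foldl_cons]

theorem pvDec_core : ∀ (f : Nat), 1 ≤ f → ∀ (n acc : Nat) (l : List Char), n < 10 ^ f →
    pvDec acc (Nat.toDigitsCore 10 f n l) = pvDec (acc * 10 ^ (Nat.log 10 n + 1) + n) l := by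
  intro f
  induction f with
  | zero => omega
  | succ f ih =>
    intro _ n acc l hn
    rw [show Nat.toDigitsCore 10 (f+1) n l = (if n / 10 = 0 then Nat.digitChar (n % 10) :: l else Nat.toDigitsCore 10 f (n / 10) (Nat.digitChar (n % 10) :: l)) from rfl]
    by_cases h0 : n / 10 = 0
    · have hn10 : n < 10 := by omega
      have hlog : Nat.log 10 n = 0 := Nat.log_eq_zero_iff.mpr (Or.inl hn10)
      have hmod : n % 10 = n := Nat.mod_eq_of_lt hn10
      rw [if_pos h0, pvDec_cons, pvDigitChar_val (show n % 10 < 10 by omega), hmod, hlog]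
      norm_num
    · rw [if_neg h0]
      have hf1 : 1 ≤ f := by
        by_contra hf
        have : f = 0 := by omega
        subst this
        simp at hn
        omega
      have hdiv : n / 10 < 10 ^ f := by
        rw [Nat.div_lt_iff_lt_mul (by norm_num)]
        calc n < 10 ^ (f + 1) := hn
        _ = 10 ^ f * 10 := by ring
      rw [ih hf1 (n / 10) _ _ hdiv, pvDec_cons,
        pvDigitChar_val (show n % 10 < 10 by omega)]
      have hge : 10 ≤ n := by omega
      have hlog : Nat.log 10 (n / 10) + 1 = Nat.log 10 n := by
        rw [Nat.log_div_base]
        have := Nat.log_pos (by norm_num : 1 < 10) hge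
        omega
      congr 1
      rw [← hlog, pow_succ]
      have := Nat.div_add_mod n 10
      ring_nf
      omega

theorem pvDec_toDigits (n : Nat) : pvDec 0 (Nat.toDigits 10 n) = n := by
  have h1 : n < 10 ^ n := Nat.lt_pow_self (by norm_num)
  have h2 : 10 ^ n ≤ 10 ^ (n + 1) := Nat.pow_le_pow_right (by norm_num) (by omega)
  rw [show Nat.toDigits 10 n = Nat.toDigitsCore 10 (n + 1) n [] from rfl,
    pvDec_core (n + 1) (by omega) n 0 [] (lt_of_lt_of_le h1 h2)]
  show 0 * 10 ^ (Nat.log 10 n + 1) + n = n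
  omega

theorem pvToChars_inj {a b : Int} (ha : 0 ≤ a) (hb : 0 ≤ b)
    (h : PySem.Int.toChars a = PySem.Int.toChars b) : a = b := by
  simp only [PySem.Int.toChars, if_neg (by omega : ¬ a < 0), if_neg (by omega : ¬ b < 0)] at h
  have := congrArg (pvDec 0) h
  rw [pvDec_toDigits, pvDec_toDigits] at this
  omega

theorem pvCand_toList (name : String) (k : Int) :
    (pvCand name k).toList = name.toList ++ '(' :: (PySem.Int.toChars k ++ [')']) := by
  simp [pvCand, String.toList_append, PySem.Int.toList_toStr]

theorem pvCand_inj {name : String} {a b : Int} (ha : 0 ≤ a) (hb : 0 ≤ b)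
    (h : pvCand name a = pvCand name b) : a = b := by
  have h2 := congrArg String.toList h
  rw [pvCand_toList, pvCand_toList] at h2
  have h3 := List.append_cancel_left h2
  have h5 : PySem.Int.toChars a ++ [')'] = PySem.Int.toChars b ++ [')'] := by
    simpa using h3
  exact pvToChars_inj ha hb (List.append_cancel_right h5)

-- pigeonhole: among |S|+1 consecutive candidates at least one is not in S
theorem pv_exists_free (S : List String) (name : String) (k : Int) (hk : 1 ≤ k) :
    ∃ j : Nat, j ≤ S.length ∧ pvCand name (k + (j : Int)) ∉ S := by
  by_contra hc
  push Not at hc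
  have hsub : ((List.range (S.length + 1)).map (fun j : Nat => pvCand name (k + (j : Int)))) ⊆ S := by
    intro x hx
    simp only [List.mem_map, List.mem_range] at hx
    obtain ⟨j, hj, rfl⟩ := hx
    exact hc j (by omega)
  have hnd : ((List.range (S.length + 1)).map (fun j : Nat => pvCand name (k + (j : Int)))).Nodup := by
    refine List.Nodup.map_on ?_ (List.nodup_range)
    intro i _ j _ hEq
    have := pvCand_inj (by omega : (0:Int) ≤ k + i) (by omega : (0:Int) ≤ k + j) hEq
    omega
  have := (List.subperm_of_subset hnd hsub).length_le
  simp at this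

-- A's while-loop returns the least free index, given enough fuel
theorem pvFindA_spec (c : PySem.Dict String Int) (name : String) :
    ∀ (f : Nat) (k L : Int), k ≤ L → L < k + f →
      c.contains (pvCand name L) = false →
      (∀ j : Int, k ≤ j → j < L → c.contains (pvCand name j) = true) →
      pvFindA c name k f = L := by
  intro f
  induction f with
  | zero => intro k L h1 h2 _ _; omega
  | succ f ih =>
    intro k L h1 h2 hfree hocc
    by_cases hk : k = L
    · subst hk
      simp only [pvFindA, hfree, Bool.false_eq_true, if_false]
    · have hklt : k < L := by omega
      have hck : c.contains (pvCand name k) = true := hocc k le_rfl hklt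
      simp only [pvFindA, hck, if_true]
      exact ih (k + 1) L (by omega) (by omega) hfree
        (fun j hj1 hj2 => hocc j (by omega) hj2)

-- the first element of a filtered integer range is the least element satisfying the predicate
theorem pvFilter_first (p : Int → Bool) :
    ∀ (n : Nat) (a L : Int), a ≤ L → L < a + n → p L = true →
      (∀ j : Int, a ≤ j → j < L → p j = false) →
      ∃ t, (PySem.List.pyRange a (a + n) 1).filter p = L :: t := by
  intro n
  induction n with
  | zero => intro a L h1 h2 _ _; omega
  | succ n ih =>
    intro a L h1 h2 hL hocc
    rw [PySem.List.pyRange_one_cons (by omega : a < a + (n + 1 : Nat))]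
    by_cases ha : a = L
    · subst ha
      exact ⟨_, by rw [List.filter_cons_of_pos hL]⟩
    · rw [List.filter_cons_of_neg (by simp [hocc a le_rfl (by omega)])]
      have : a + 1 + (n : Int) = a + ((n + 1 : Nat) : Int) := by push_cast; ring
      obtain ⟨t, ht⟩ := ih (a + 1) L (by omega) (by omega) hL
        (fun j hj1 hj2 => hocc j (by omega) hj2)
      rw [this] at ht
      exact ⟨t, ht⟩

-- B's filtered-range search returns the candidate with the least free suffix
theorem pvFree_eq (u : PySem.Set String) (name : String) (L : Int)
    (h1 : 1 ≤ L) (h2 : L ≤ (u.length : Int) + 1)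
    (hfree : PySem.Set.contains u (pvCand name L) = false)
    (hocc : ∀ j : Int, 1 ≤ j → j < L → PySem.Set.contains u (pvCand name j) = true) :
    pvFree u name = pvCand name L := by
  obtain ⟨t, ht⟩ := pvFilter_first (fun k => !(PySem.Set.contains u (pvCand name k)))
    (u.length + 1) 1 L h1 (by push_cast; omega) (by simp only [hfree, Bool.not_false])
    (fun j hj1 hj2 => by simp only [hocc j hj1 hj2, Bool.not_true])
  have hb : (1 : Int) + ((u.length + 1 : Nat) : Int) = (u.length : Int) + 2 := by push_cast; ring
  rw [hb] at ht
  rw [pvFree, ht]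

-- the coupling invariant between A's counter dict and B's used set
def pvInv (c : PySem.Dict String Int) (u : PySem.Set String) : Prop :=
  (∀ s : String, c.contains s = PySem.Set.contains u s) ∧
  (∀ (nm : String) (v : Int), c.get? nm = some v →
    1 ≤ v ∧ ∀ j : Int, 1 ≤ j → j < v → c.contains (pvCand nm j) = true)

theorem pvSet_contains_iff (u : PySem.Set String) (s : String) :
    PySem.Set.contains u s = true ↔ s ∈ u := by
  simp [PySem.Set.contains]

theorem pvKeys_length (c : PySem.Dict String Int) : c.keys.length = c.size := by
  simp [PySem.Dict.keys, PySem.Dict.size]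

-- in a coupled state A's while-loop and B's filtered range pick the same suffix L,
-- which is free, and everything below L is occupied
theorem pvFind_agree (c : PySem.Dict String Int) (u : PySem.Set String) (name : String)
    (h : pvInv c u) (hc : c.contains name = true) :
    ∃ L : Int, pvFindA c name (c.getD name 0) (c.size + 1) = L ∧
      pvFree u name = pvCand name L ∧ 1 ≤ L ∧
      c.contains (pvCand name L) = false ∧
      (∀ j : Int, 1 ≤ j → j < L → c.contains (pvCand name j) = true) := by
  obtain ⟨h1, h2⟩ := h
  have hget : c.get? name = some (c.getD name 0) := by
    rw [PySem.Dict.contains_eq_isSome_get?] at hc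
    rw [PySem.Dict.getD_eq_get?_getD]
    cases hg : c.get? name with
    | none => rw [hg] at hc; simp at hc
    | some v => rfl
  set c0 := c.getD name 0 with hc0
  obtain ⟨hc01, hpre⟩ := h2 name c0 hget
  have hQex : ∃ m : Nat, PySem.Set.contains u (pvCand name (1 + (m : Int))) = false := by
    obtain ⟨j, _, hj⟩ := pv_exists_free u name 1 (le_refl 1)
    exact ⟨j, by rw [Bool.eq_false_iff]; intro hcon; exact hj ((pvSet_contains_iff u _).mp hcon)⟩
  classical
  let m0 := Nat.find hQex
  set L : Int := 1 + (m0 : Int) with hL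
  have hL1 : 1 ≤ L := by omega
  have hfreeB : PySem.Set.contains u (pvCand name L) = false := Nat.find_spec hQex
  have hfreeA : c.contains (pvCand name L) = false := by rw [h1]; exact hfreeB
  have hoccB : ∀ j : Int, 1 ≤ j → j < L → PySem.Set.contains u (pvCand name j) = true := by
    intro j hj1 hj2
    have hm : (j - 1).toNat < m0 := by omega
    have := Nat.find_min hQex hm
    have hj' : 1 + (((j - 1).toNat : Nat) : Int) = j := by omega
    rw [hj'] at this
    simpa using this
  have hoccA : ∀ j : Int, 1 ≤ j → j < L → c.contains (pvCand name j) = true := by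
    intro j hj1 hj2; rw [h1]; exact hoccB j hj1 hj2
  have hc0L : c0 ≤ L := by
    by_contra hlt
    have := hpre L hL1 (by omega)
    rw [this] at hfreeA; exact absurd hfreeA (by simp)
  have hLA : L < c0 + ((c.size : Int) + 1) := by
    obtain ⟨j, hjle, hj⟩ := pv_exists_free c.keys name c0 (by omega)
    have hfree' : PySem.Set.contains u (pvCand name (c0 + (j : Int))) = false := by
      rw [← h1, Bool.eq_false_iff]
      intro hcon
      exact hj ((PySem.Dict.contains_iff_mem_keys c _).mp hcon)
    have hm' : PySem.Set.contains u (pvCand name (1 + (((c0 + (j : Int) - 1).toNat : Nat) : Int))) = false := by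
      have : 1 + (((c0 + (j : Int) - 1).toNat : Nat) : Int) = c0 + (j : Int) := by omega
      rw [this]; exact hfree'
    have := Nat.find_min' hQex hm'
    have hkl := pvKeys_length c
    omega
  have hLB : L ≤ (u.length : Int) + 1 := by
    obtain ⟨j, hjle, hj⟩ := pv_exists_free u name 1 (le_refl 1)
    have : PySem.Set.contains u (pvCand name (1 + (j : Int))) = false := by
      rw [Bool.eq_false_iff]; intro hcon; exact hj ((pvSet_contains_iff u _).mp hcon)
    have := Nat.find_min' hQex this
    omega
  refine ⟨L, ?_, ?_, hL1, hfreeA, hoccA⟩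
  · exact pvFindA_spec c name (c.size + 1) c0 L hc0L (by push_cast; omega) hfreeA
      (fun j hj1 hj2 => hoccA j (by omega) hj2)
  · exact pvFree_eq u name L hL1 hLB hfreeB hoccB

theorem pvSet_contains_add (u : PySem.Set String) (x s : String) :
    PySem.Set.contains (PySem.Set.add u x) s = (s == x || PySem.Set.contains u s) := by
  rw [Bool.eq_iff_iff]
  simp only [Bool.or_eq_true, beq_iff_eq, pvSet_contains_iff, PySem.Set.mem_add]
  tauto

-- one A-step appends exactly the name B chooses, and the invariant is preserved
theorem pvStep_agree (acc : List String) (c : PySem.Dict String Int)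
    (u : PySem.Set String) (name : String) (h : pvInv c u) :
    ∃ nm, (if PySem.Set.contains u name then pvFree u name else name) = nm ∧
      pvStepA (acc, c) name = (acc ++ [nm], (pvStepA (acc, c) name).2) ∧
      pvInv (pvStepA (acc, c) name).2 (PySem.Set.add u nm) := by
  have h1 := h.1
  have h2 := h.2
  by_cases hc : c.contains name = true
  · have hcB : PySem.Set.contains u name = true := by rw [← h1]; exact hc
    obtain ⟨L, hA, hB, hL1, hfree, hocc⟩ := pvFind_agree c u name h hc
    have hstA : pvStepA (acc, c) name =
        (acc ++ [pvCand name L], (c.insert name (L + 1)).insert (pvCand name L) 1) := by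
      simp only [pvStepA, hc, if_true]
      rw [hA]
    refine ⟨pvCand name L, by rw [if_pos hcB]; exact hB, by rw [hstA], ?_⟩
    rw [hstA]
    dsimp only
    constructor
    · intro s
      rw [PySem.Dict.contains_insert, PySem.Dict.contains_insert, pvSet_contains_add, h1]
      cases hbe : (s == name)
      · simp
      · have hs : s = name := by simpa using hbe
        subst hs
        simp [(pvSet_contains_iff u s).mp hcB]
    · intro nm v hget
      rw [PySem.Dict.get?_insert] at hget
      by_cases he1 : nm = pvCand name L
      · rw [if_pos he1] at hget
        injection hget with hv
        exact ⟨by omega, fun j hj1 hj2 => by omega⟩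
      · rw [if_neg he1, PySem.Dict.get?_insert] at hget
        by_cases he2 : nm = name
        · rw [if_pos he2] at hget
          injection hget with hv
          subst he2
          constructor
          · omega
          · intro j hj1 hj2
            rw [PySem.Dict.contains_insert, PySem.Dict.contains_insert]
            by_cases hjL : j = L
            · subst hjL; simp
            · have : c.contains (pvCand nm j) = true := hocc j hj1 (by omega)
              simp [this]
        · rw [if_neg he2] at hget
          obtain ⟨hv1, hv2⟩ := h2 nm v hget
          refine ⟨hv1, fun j hj1 hj2 => ?_⟩
          rw [PySem.Dict.contains_insert, PySem.Dict.contains_insert]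
          simp [hv2 j hj1 hj2]
  · have hc' : c.contains name = false := by simpa using hc
    have hcB : PySem.Set.contains u name = false := by rw [← h1]; exact hc'
    have hstA : pvStepA (acc, c) name = (acc ++ [name], c.insert name 1) := by
      simp only [pvStepA, hc', Bool.false_eq_true, if_false]
    refine ⟨name, by rw [hcB]; simp, by rw [hstA], ?_⟩
    rw [hstA]
    dsimp only
    constructor
    · intro s
      rw [PySem.Dict.contains_insert, pvSet_contains_add, h1]
    · intro nm v hget
      rw [PySem.Dict.get?_insert] at hget
      by_cases he : nm = name
      · rw [if_pos he] at hget
        injection hget with hv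
        refine ⟨by omega, fun j hj1 hj2 => by omega⟩
      · rw [if_neg he] at hget
        obtain ⟨hv1, hv2⟩ := h2 nm v hget
        refine ⟨hv1, fun j hj1 hj2 => ?_⟩
        rw [PySem.Dict.contains_insert]
        simp [hv2 j hj1 hj2]

-- A's fold equals acc ++ B's recursion, under the invariant
theorem pvLoop_eq : ∀ (ns : List String) (acc : List String)
    (c : PySem.Dict String Int) (u : PySem.Set String), pvInv c u →
    (ns.foldl pvStepA (acc, c)).1 = acc ++ pvAssign ns u := by
  intro ns
  induction ns with
  | nil => intro acc c u _; simp [pvAssign]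
  | cons n ns ih =>
    intro acc c u h
    obtain ⟨nm, hnm, hA, hinv⟩ := pvStep_agree acc c u n h
    rw [List.foldl_cons, hA, ih (acc ++ [nm]) _ _ hinv]
    simp only [pvAssign]
    rw [hnm]
    simp

-- ===== VERDICT (by name: the statement is the Claim_ definition above) =====
theorem getFolderNames_spec : Claim_equal_getFolderNames := by
  intro names _
  unfold Spec_getFolderNames getFolderNames getFolderNames_alt
  rw [pvLoop_eq names [] PySem.Dict.empty PySem.Set.empty
    ⟨fun s => by simp [PySem.Dict.contains_empty, PySem.Set.empty, PySem.Set.contains],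
     fun nm v hv => by simp [PySem.Dict.get?_empty] at hv⟩]
  rfl
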